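-- pv_equiv track=rewrite | github.com/michaelbaquet/python_leetcode | validpalindrome125.py | is_valid_palindrome2
-- ===== SOURCE A (Python) =====
-- def is_valid_palindrome2(s: str) -> bool:
--     if s is None:
--         return False
--     newStr = ""
--
--     for c in s:
--         if c.isalnum():
--             newStr += c.lower()
--     return newStr == newStr[::-1]
-- ===== SOURCE B (Python) =====
-- def is_valid_palindrome2(s: str) -> bool:
--     if s is None:
--         return False
--     i, j = 0, len(s) - 1
--     while i < j:
--         if not s[i].isalnum():
--             i += 1
--         elif not s[j].isalnum():
--             j -= 1
--         elif s[i].lower() != s[j].lower():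
--             return False
--         else:
--             i += 1
--             j -= 1
--     return True
-- ===== Notes on version B (the rewrite author's own statement) =====
-- stated objective: alternative
-- what changed: Replaces A's build of a lowered filtered copy plus full-reverse comparison by an in-place two-pointer scan from both ends that skips non-alphanumerics and compares lowered characters, using O(1) extra space and stopping at the first mismatch.
import Mathlib
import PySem

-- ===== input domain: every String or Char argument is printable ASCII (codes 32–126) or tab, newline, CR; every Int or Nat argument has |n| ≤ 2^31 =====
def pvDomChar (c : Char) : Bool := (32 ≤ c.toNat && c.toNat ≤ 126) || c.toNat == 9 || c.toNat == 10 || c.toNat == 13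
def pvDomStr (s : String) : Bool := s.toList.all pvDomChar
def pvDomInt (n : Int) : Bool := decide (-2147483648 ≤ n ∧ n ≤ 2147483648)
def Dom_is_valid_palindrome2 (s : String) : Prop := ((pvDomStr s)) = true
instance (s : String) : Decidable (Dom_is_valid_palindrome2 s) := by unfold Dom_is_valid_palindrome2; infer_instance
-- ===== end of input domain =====

-- B replaces A's filtered-copy build + reverse comparison by an in-place two-pointer scan from both ends (alternative algorithm, O(1) extra space).


-- ===== PORT A =====
-- for c in s: if c.isalnum(): newStr += c.lower();  then newStr == newStr[::-1]
def is_valid_palindrome2 (s : String) : Bool :=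
  let newStr : List Char :=
    s.toList.foldl (fun acc c => if PySem.Chars.isalnum c then acc ++ [PySem.Chars.lowerChar c] else acc) []
  newStr == newStr.reverse

-- ===== PORT B =====
-- the while loop: i moves from the left, j from the right; j - i decreases each iteration.
-- s[i] / s[j] are in range whenever read (0 ≤ i < j < len s), so the `.getD ' '` default is never used.
def pvPalAux (cs : List Char) (i j : Nat) : Bool :=
  if _h : i < j then
    if !PySem.Chars.isalnum (cs[i]?.getD ' ') then pvPalAux cs (i+1) j
    else if !PySem.Chars.isalnum (cs[j]?.getD ' ') then pvPalAux cs i (j-1)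
    else if !(PySem.Chars.lowerChar (cs[i]?.getD ' ') == PySem.Chars.lowerChar (cs[j]?.getD ' ')) then false
    else pvPalAux cs (i+1) (j-1)
  else true
termination_by j - i
decreasing_by all_goals omega

def is_valid_palindrome2_alt (s : String) : Bool :=
  pvPalAux s.toList 0 (s.toList.length - 1)

-- ===== PRECONDITION & SPEC =====
def Spec_is_valid_palindrome2 (s : String) (out : Bool) : Prop := out = is_valid_palindrome2_alt s
instance (s : String) (out : Bool) : Decidable (Spec_is_valid_palindrome2 s out) := by unfold Spec_is_valid_palindrome2; infer_instance

-- ===== CLAIM (what is proved, stated in full; the proofs are below) =====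
def Claim_equal_is_valid_palindrome2 : Prop := ∀ (s : String), Dom_is_valid_palindrome2 s → Spec_is_valid_palindrome2 s (is_valid_palindrome2 s)

-- ===== LEMMAS AND PROOFS =====

-- the lowered alphanumeric content of a char list
def pvDefFilt (cs : List Char) : List Char :=
  (cs.filter PySem.Chars.isalnum).map PySem.Chars.lowerChar

lemma pvFoldA (cs acc : List Char) :
    cs.foldl (fun acc c => if PySem.Chars.isalnum c then acc ++ [PySem.Chars.lowerChar c] else acc) acc
      = acc ++ pvDefFilt cs := by
  induction cs generalizing acc with
  | nil => simp [pvDefFilt]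
  | cons c t ih =>
    by_cases h : PySem.Chars.isalnum c
    · simp [pvDefFilt, List.foldl_cons, h, ih]
    · simp [pvDefFilt, List.foldl_cons, h, ih]

-- palindromicity of x :: u ++ [y]
lemma pvSandwich (x y : Char) (u : List Char) :
    ((x :: (u ++ [y])) = (x :: (u ++ [y])).reverse) ↔ (x = y ∧ u = u.reverse) := by
  constructor
  · intro h
    rw [List.reverse_cons, List.reverse_append, List.reverse_singleton] at h
    have hx : x = y := by
      have := congrArg (fun l => l.headI) h; simpa using this
    subst hx
    refine ⟨rfl, ?_⟩
    simp only [List.singleton_append] at h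
    have h2 : u ++ [x] = u.reverse ++ [x] := List.cons_injective h
    have h3 := congrArg (fun l => l.take u.length) h2
    simpa using h3
  · rintro ⟨hx, hu⟩
    subst hx
    rw [List.reverse_cons, List.reverse_append, List.reverse_singleton]
    simp [← hu]

lemma pvSandwichBeq (z : Char) (L : List Char) :
    ((z :: (L ++ [z])) == (z :: (L ++ [z])).reverse) = (L == L.reverse) := by
  rw [Bool.eq_iff_iff, beq_iff_eq, beq_iff_eq, pvSandwich z z L]
  exact ⟨fun h => h.2, fun h => ⟨rfl, h⟩⟩

lemma pvSandwichBeqFalse (x y : Char) (L : List Char) (hxy : x ≠ y) :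
    ((x :: (L ++ [y])) == (x :: (L ++ [y])).reverse) = false := by
  apply beq_eq_false_iff_ne.mpr
  intro h
  exact hxy ((pvSandwich x y L).mp h).1

lemma pvShortPal (l : List Char) (h : l.length ≤ 1) : l = l.reverse := by
  match l with
  | [] => rfl
  | [a] => rfl
  | a :: b :: t => simp at h

-- the slice cs[i..j] (inclusive)
def pvSub (cs : List Char) (i j : Nat) : List Char := (cs.drop i).take (j + 1 - i)

lemma pvSub_cons (cs : List Char) (i j : Nat) (hij : i ≤ j) (hj : j < cs.length) :
    pvSub cs i j = cs[i]?.getD ' ' :: pvSub cs (i+1) j := by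
  unfold pvSub
  have hi : i < cs.length := lt_of_le_of_lt hij hj
  have hd : cs.drop i = cs[i]?.getD ' ' :: cs.drop (i+1) := by
    rw [List.getElem?_eq_getElem hi, Option.getD_some]
    exact List.drop_eq_getElem_cons hi
  rw [hd]
  have h1 : j + 1 - i = (j + 1 - (i+1)) + 1 := by omega
  rw [h1, List.take_succ_cons]

lemma pvSub_snoc (cs : List Char) (i j : Nat) (hij : i ≤ j) (hj1 : 1 ≤ j) (hj : j < cs.length) :
    pvSub cs i j = pvSub cs i (j-1) ++ [cs[j]?.getD ' '] := by
  unfold pvSub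
  have h1 : j + 1 - i = (j - i) + 1 := by omega
  have h2 : j - 1 + 1 - i = j - i := by omega
  rw [h1, h2, List.take_add_one]
  have hget : (cs.drop i)[j - i]? = some (cs[j]?.getD ' ') := by
    rw [List.getElem?_drop]
    have h3 : i + (j - i) = j := by omega
    rw [h3, List.getElem?_eq_getElem hj, Option.getD_some]
  rw [hget]
  simp

lemma pvFilt_short (cs : List Char) (i j : Nat) (hij : ¬ i < j) :
    pvDefFilt (pvSub cs i j) = (pvDefFilt (pvSub cs i j)).reverse := by
  apply pvShortPal
  have h1 : (pvSub cs i j).length ≤ 1 := by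
    unfold pvSub
    have := List.length_take_le (j + 1 - i) (cs.drop i)
    omega
  unfold pvDefFilt
  rw [List.length_map]
  exact le_trans (List.length_filter_le _ _) h1

lemma pvPalAux_eq (n : Nat) : ∀ (cs : List Char) (i j : Nat), j < cs.length → j + 1 - i ≤ n →
    pvPalAux cs i j = (pvDefFilt (pvSub cs i j) == (pvDefFilt (pvSub cs i j)).reverse) := by
  induction n with
  | zero =>
    intro cs i j hj hn
    have hij : ¬ i < j := by omega
    rw [pvPalAux, dif_neg hij]
    exact (beq_iff_eq.mpr (pvFilt_short cs i j hij)).symm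
  | succ n ih =>
    intro cs i j hj hn
    rw [pvPalAux]
    by_cases hij : i < j
    · rw [dif_pos hij]
      cases ha : PySem.Chars.isalnum (cs[i]?.getD ' ') with
      | false =>
        simp only [Bool.not_false, if_true]
        rw [ih cs (i+1) j (by omega) (by omega)]
        have heq : pvDefFilt (pvSub cs i j) = pvDefFilt (pvSub cs (i+1) j) := by
          rw [pvSub_cons cs i j (le_of_lt hij) hj]
          simp [pvDefFilt, ha]
        rw [heq]
      | true =>
        cases hb : PySem.Chars.isalnum (cs[j]?.getD ' ') with
        | false =>
          simp only [Bool.not_true, Bool.not_false, Bool.false_eq_true, if_false, if_true]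
          rw [ih cs i (j-1) (by omega) (by omega)]
          have heq : pvDefFilt (pvSub cs i j) = pvDefFilt (pvSub cs i (j-1)) := by
            rw [pvSub_snoc cs i j (le_of_lt hij) (by omega) hj]
            simp [pvDefFilt, List.filter_append, hb]
          rw [heq]
        | true =>
          simp only [Bool.not_true, Bool.false_eq_true, if_false]
          have hdec : pvSub cs i j = cs[i]?.getD ' ' :: (pvSub cs (i+1) (j-1) ++ [cs[j]?.getD ' ']) := by
            rw [pvSub_cons cs i j (le_of_lt hij) hj,
                pvSub_snoc cs (i+1) j (by omega) (by omega) hj]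
          have hmid : pvDefFilt (pvSub cs i j)
              = PySem.Chars.lowerChar (cs[i]?.getD ' ') ::
                (pvDefFilt (pvSub cs (i+1) (j-1)) ++ [PySem.Chars.lowerChar (cs[j]?.getD ' ')]) := by
            rw [hdec]
            simp [pvDefFilt, List.filter_append, ha, hb]
          cases hc : (PySem.Chars.lowerChar (cs[i]?.getD ' ') == PySem.Chars.lowerChar (cs[j]?.getD ' ')) with
          | false =>
            simp only [Bool.not_false, if_true]
            have hc' : PySem.Chars.lowerChar (cs[i]?.getD ' ') ≠ PySem.Chars.lowerChar (cs[j]?.getD ' ') :=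
              beq_eq_false_iff_ne.mp hc
            rw [hmid, pvSandwichBeqFalse _ _ _ hc']
          | true =>
            simp only [Bool.not_true, Bool.false_eq_true, if_false]
            have hc' : PySem.Chars.lowerChar (cs[i]?.getD ' ') = PySem.Chars.lowerChar (cs[j]?.getD ' ') :=
              eq_of_beq hc
            rw [ih cs (i+1) (j-1) (by omega) (by omega), hmid, hc', pvSandwichBeq]
    · rw [dif_neg hij]
      exact (beq_iff_eq.mpr (pvFilt_short cs i j hij)).symm

lemma pvMain (cs : List Char) :
    ((pvDefFilt cs == (pvDefFilt cs).reverse) : Bool) = pvPalAux cs 0 (cs.length - 1) := by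
  cases cs with
  | nil =>
    rw [pvPalAux]
    simp [pvDefFilt]
  | cons c t =>
    rw [pvPalAux_eq ((c :: t).length) (c :: t) 0 ((c :: t).length - 1) (by simp) (by simp)]
    have hsub : pvSub (c :: t) 0 ((c :: t).length - 1) = c :: t := by
      unfold pvSub
      rw [List.drop_zero]
      have h1 : (c :: t).length - 1 + 1 - 0 = (c :: t).length := by simp
      rw [h1, List.take_length]
    rw [hsub]

-- ===== VERDICT (by name: the statement is the Claim_ definition above) =====
theorem is_valid_palindrome2_spec : Claim_equal_is_valid_palindrome2 := by
  intro s _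
  show is_valid_palindrome2 s = is_valid_palindrome2_alt s
  simp only [is_valid_palindrome2, is_valid_palindrome2_alt]
  rw [pvFoldA, List.nil_append]
  exact pvMain s.toList
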